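-- pv_equiv track=rewrite | github.com/ciceklab/ECOLE | scripts/ECOLE_call.py | grouped_preds
-- ===== SOURCE A (Python) =====
-- from itertools import groupby
--
-- def grouped_preds(preds):
--     idx = 0
--     result = []
--     ele = -1
--     for key, sub in groupby(preds):
--         ele = len(list(sub))
--         result.append((idx,idx + ele-1))
--         idx += ele
--
--     return result
-- ===== SOURCE B (Python) =====
-- def grouped_preds(preds):
--     xs = list(preds)
--     n = len(xs)
--     cuts = [i + 1 for i, (a, b) in enumerate(zip(xs, xs[1:])) if a != b]
--     starts = [0] + cuts
--     ends = [c - 1 for c in cuts] + [n - 1]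
--     return list(zip(starts, ends)) if n else []
-- ===== Notes on version B (the rewrite author's own statement) =====
-- stated objective: alternative
-- what changed: Instead of grouping elements into runs (groupby with len(list(sub)) and a running index), B computes the boundary positions by zipping the list with its own tail and then builds the spans in one shot by pairing the shifted boundary lists (zero prepended to the cut list as starts; each cut minus one, then the last index, as ends).
import Mathlib
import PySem

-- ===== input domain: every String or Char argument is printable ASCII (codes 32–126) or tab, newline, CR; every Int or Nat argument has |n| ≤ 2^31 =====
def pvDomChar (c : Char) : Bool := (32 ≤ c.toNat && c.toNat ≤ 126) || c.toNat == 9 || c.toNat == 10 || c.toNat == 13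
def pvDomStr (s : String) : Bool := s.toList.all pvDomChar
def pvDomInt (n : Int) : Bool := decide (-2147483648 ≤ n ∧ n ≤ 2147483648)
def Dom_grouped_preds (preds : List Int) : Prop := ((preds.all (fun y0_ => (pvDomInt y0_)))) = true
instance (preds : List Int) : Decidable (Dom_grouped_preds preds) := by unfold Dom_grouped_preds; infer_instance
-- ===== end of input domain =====

-- B builds the spans from the boundary positions (zip the list with its tail, collect the cut indices, pair the shifted cut lists) instead of grouping runs with groupby; an alternative decomposition of the same asymptotic cost.

-- ===== PORT A =====
-- itertools.groupby: consecutive equal elements grouped, yielding (key, group) in order.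
def pyGroupby (xs : List Int) : List (Int × List Int) :=
  match xs with
  | [] => []
  | x :: rest =>
    match pyGroupby rest with
    | [] => [(x, [x])]
    | (k, g) :: gs => if x = k then (k, x :: g) :: gs else (x, [x]) :: (k, g) :: gs

def grouped_preds (preds : List Int) : List (Int × Int) :=
  -- for key, sub in groupby(preds): ele = len(list(sub)); result.append((idx, idx+ele-1)); idx += ele
  ((pyGroupby preds).foldl
    (fun (st : List (Int × Int) × Int) kg =>
      let ele : Int := (kg.2.length : Int)
      (st.1 ++ [(st.2, st.2 + ele - 1)], st.2 + ele))
    ([], 0)).1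

-- ===== PORT B =====
def grouped_preds_alt (preds : List Int) : List (Int × Int) :=
  let xs := preds
  let n : Int := (xs.length : Int)
  -- cuts = [i + 1 for i, (a, b) in enumerate(zip(xs, xs[1:])) if a != b]
  let cuts : List Int :=
    ((PySem.List.enumerate (xs.zip (PySem.List.slice xs (some 1) none)) 0).filter
      (fun p => !(p.2.1 == p.2.2))).map (fun p => p.1 + 1)
  -- starts = [0] + cuts ; ends = [c - 1 for c in cuts] + [n - 1]
  if n == 0 then []
  else List.zip ((0 : Int) :: cuts) (cuts.map (· - 1) ++ [n - 1])

-- ===== PRECONDITION & SPEC =====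
def Spec_grouped_preds (preds : List Int) (out : List (Int × Int)) : Prop := out = grouped_preds_alt preds
instance (preds : List Int) (out : List (Int × Int)) : Decidable (Spec_grouped_preds preds out) := by unfold Spec_grouped_preds; infer_instance

-- ===== CLAIM (what is proved, stated in full; the proofs are below) =====
def Claim_equal_grouped_preds : Prop := ∀ (preds : List Int), Dom_grouped_preds preds → Spec_grouped_preds preds (grouped_preds preds)

-- ===== LEMMAS AND PROOFS =====

-- spans of a group list starting at index idx
def spans (gs : List (Int × List Int)) (idx : Int) : List (Int × Int) :=
  match gs with
  | [] => []
  | (_, g) :: rest => (idx, idx + (g.length : Int) - 1) :: spans rest (idx + (g.length : Int))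

-- overwrite the first span's start
def setFirst (s : Int) (ps : List (Int × Int)) : List (Int × Int) :=
  match ps with
  | [] => []
  | (_, b) :: rest => (s, b) :: rest

-- boundary positions of prev::xs, where position j is the index of the head of xs
def cutsGo (prev : Int) (xs : List Int) (j : Int) : List Int :=
  match xs with
  | [] => []
  | y :: ys => if prev = y then cutsGo y ys (j + 1) else j :: cutsGo y ys (j + 1)

theorem foldl_spans (gs : List (Int × List Int)) (res : List (Int × Int)) (idx : Int) :
    (gs.foldl (fun (st : List (Int × Int) × Int) kg =>
      let ele : Int := (kg.2.length : Int)
      (st.1 ++ [(st.2, st.2 + ele - 1)], st.2 + ele)) (res, idx)).1 = res ++ spans gs idx := by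
  induction gs generalizing res idx with
  | nil => simp [spans]
  | cons kg gs ih =>
    obtain ⟨k, g⟩ := kg
    simp [List.foldl, spans, ih]

theorem grouped_preds_eq_spans (preds : List Int) :
    grouped_preds preds = spans (pyGroupby preds) 0 := by
  simpa using foldl_spans (pyGroupby preds) [] 0

theorem pyGroupby_head_key (x : Int) (xs : List Int) :
    ∃ g gs, pyGroupby (x :: xs) = (x, g) :: gs := by
  induction xs generalizing x with
  | nil => exact ⟨[x], [], rfl⟩
  | cons y ys ih =>
    obtain ⟨g, gs, h⟩ := ih y
    by_cases hxy : x = y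
    · exact ⟨x :: g, gs, by rw [pyGroupby, h]; simp [hxy]⟩
    · exact ⟨[x], (y, g) :: gs, by rw [pyGroupby, h]; simp [hxy]⟩

theorem setFirst_spans_self (gs : List (Int × List Int)) (idx : Int) :
    setFirst idx (spans gs idx) = spans gs idx := by
  cases gs with
  | nil => rfl
  | cons kg rest => obtain ⟨k, g⟩ := kg; simp [spans, setFirst]

-- the enumerate/zip/filter/map comprehension computes cutsGo
theorem cuts_eq_cutsGo (xs : List Int) (prev : Int) (i : Int) :
    ((PySem.List.enumerate ((prev :: xs).zip xs) i).filter
      (fun p => !(p.2.1 == p.2.2))).map (fun p => p.1 + 1) = cutsGo prev xs (i + 1) := by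
  induction xs generalizing prev i with
  | nil => rfl
  | cons y ys ih =>
    by_cases h : prev = y
    · simp [PySem.List.enumerate_cons, cutsGo, h, ih y (i + 1)]
    · simp [PySem.List.enumerate_cons, cutsGo, h, ih y (i + 1)]

-- pairing the shifted cut lists yields the spans of the groups (first start overwritten)
theorem zip_cuts_eq_spans (xs : List Int) (prev s i : Int) :
    List.zip (s :: cutsGo prev xs i)
      ((cutsGo prev xs i).map (· - 1) ++ [i + (xs.length : Int) - 1])
      = setFirst s (spans (pyGroupby (prev :: xs)) (i - 1)) := by
  induction xs generalizing prev s i with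
  | nil => simp [cutsGo, pyGroupby, spans, setFirst]
  | cons y ys ih =>
    obtain ⟨g, gs, hx⟩ := pyGroupby_head_key y ys
    have harith2 : i + (((y :: ys).length : Nat) : Int) - 1 = i + 1 + (ys.length : Int) - 1 := by
      simp only [List.length_cons]; push_cast; ring
    by_cases h : prev = y
    · subst h
      have h2 : pyGroupby (prev :: prev :: ys) = (prev, prev :: g) :: gs := by
        rw [pyGroupby, hx]; simp
      have := ih prev s (i + 1)
      rw [hx] at this
      rw [cutsGo, if_pos rfl, harith2, this, h2]
      have hY : i + 1 - 1 + ((g.length : Nat) : Int) = i - 1 + (((prev :: g).length : Nat) : Int) := by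
        simp only [List.length_cons]; push_cast; ring
      simp only [spans, setFirst, hY]
    · have h2 : pyGroupby (prev :: y :: ys) = (prev, [prev]) :: (y, g) :: gs := by
        rw [pyGroupby, hx]
        simp only []
        rw [if_neg h]
      rw [cutsGo, if_neg h, h2, harith2]
      simp only [List.map_cons, List.cons_append, List.zip_cons_cons]
      have := ih y i (i + 1)
      rw [hx] at this
      have hi : i + 1 - 1 = i := by ring
      rw [hi] at this
      rw [this, setFirst_spans_self]
      have hY : i - 1 + ((([prev] : List Int).length : Nat) : Int) = i := by
        simp only [List.length_cons, List.length_nil]; push_cast; ring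
      simp only [spans, setFirst, hY]

-- ===== VERDICT (by name: the statement is the Claim_ definition above) =====
theorem grouped_preds_spec : Claim_equal_grouped_preds := by
  intro preds _
  unfold Spec_grouped_preds
  cases preds with
  | nil => rfl
  | cons x rest =>
    rw [grouped_preds_eq_spans]
    simp only [grouped_preds_alt, PySem.List.slice_from_one]
    have hz : (x :: rest).zip (x :: rest).tail = (x :: rest).zip rest := rfl
    rw [hz, cuts_eq_cutsGo rest x 0]
    rw [if_neg (by intro hc; simp at hc; omega)]
    have := zip_cuts_eq_spans rest x 0 1
    norm_num at this ⊢
    rw [this, setFirst_spans_self]
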